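-- pv_equiv track=rewrite | github.com/saulrichardson/newsvlm-analysis | archive/legacy/scripts/extract_zoning_text_from_panels.py | _expand_neighbors
-- ===== SOURCE A (Python) =====
-- from typing import Any
--
-- def _expand_neighbors(blocks: list[str], base_keep: list[bool], block_features: list[dict[str, Any]], window: int = 1) -> list[bool]:
--     keep = list(base_keep)
--     n = len(blocks)
--     for i, k in enumerate(base_keep):
--         if not k:
--             continue
--         for j in range(max(0, i - window), min(n, i + window + 1)):
--             if keep[j]:
--                 continue
--             fj = block_features[j]
--             # Neighbor inclusion is conservative: only legal-ish and not strongly noisy.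
--             if (int(fj["legal_hits"]) >= 1 or bool(fj["has_section_like"])) and int(fj["noise_hits"]) <= 2:
--                 keep[j] = True
--     return keep
-- ===== SOURCE B (Python) =====
-- def _expand_neighbors(blocks, base_keep, block_features, window=1):
--     # Gather formulation: decide each output index j directly, using a prefix-sum
--     # of base_keep to test in O(1) whether j has a base-kept neighbor in the window.
--     n = len(blocks)
--     L = len(base_keep)
--     prefix = [0]
--     for k in base_keep:
--         prefix.append(prefix[-1] + (1 if k else 0))
--     out = []
--     for j, bk in enumerate(base_keep):
--         if bk:
--             out.append(True)
--             continue
--         lo = min(L, max(0, j - window))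
--         hi = max(0, min(L, j + window + 1))
--         if j < n and prefix[lo] < prefix[hi]:
--             fj = block_features[j]
--             out.append(
--                 (int(fj["legal_hits"]) >= 1 or bool(fj["has_section_like"]))
--                 and int(fj["noise_hits"]) <= 2
--             )
--         else:
--             out.append(False)
--     return out
-- ===== Notes on version B (the rewrite author's own statement) =====
-- stated objective: alternative
-- what changed: Replaces A's scatter (each base-kept index marks qualifying neighbors in a mutated mask) with a gather: every output index is decided directly from base_keep via a precomputed prefix-sum of kept blocks, so the neighbor test is O(1) per index and no mask is mutated.
import Mathlib
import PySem

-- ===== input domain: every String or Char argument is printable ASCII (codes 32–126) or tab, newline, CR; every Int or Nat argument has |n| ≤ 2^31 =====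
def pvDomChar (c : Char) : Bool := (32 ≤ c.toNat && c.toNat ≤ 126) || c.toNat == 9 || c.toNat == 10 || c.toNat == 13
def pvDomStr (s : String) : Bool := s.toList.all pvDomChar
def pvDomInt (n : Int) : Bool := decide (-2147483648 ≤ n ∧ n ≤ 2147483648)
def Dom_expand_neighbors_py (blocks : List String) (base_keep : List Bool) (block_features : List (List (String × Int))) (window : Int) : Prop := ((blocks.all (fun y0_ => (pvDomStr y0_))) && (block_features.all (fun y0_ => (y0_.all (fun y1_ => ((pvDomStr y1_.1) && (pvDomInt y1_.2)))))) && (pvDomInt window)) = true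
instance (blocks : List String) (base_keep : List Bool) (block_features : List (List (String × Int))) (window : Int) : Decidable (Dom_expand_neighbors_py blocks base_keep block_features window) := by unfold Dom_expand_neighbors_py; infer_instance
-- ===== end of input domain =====

-- B re-derives the mask index-by-index (gather) with a prefix-sum neighbor test instead of A's
-- scatter over kept blocks; equivalence of return values is proved (neither port mutates inputs).

-- shared port helper: the neighbor-qualification expression, identical in both Pythons
-- (dict lookups with default 0 are exact under Pre_, which guarantees the keys Python reads exist)
def pvQualify (fj : List (String × Int)) : Bool :=
  (decide (1 ≤ PySem.Dict.getD ⟨fj⟩ "legal_hits" 0)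
    || decide (PySem.Dict.getD ⟨fj⟩ "has_section_like" 0 ≠ 0))
  && decide (PySem.Dict.getD ⟨fj⟩ "noise_hits" 0 ≤ 2)

-- ===== PORT A =====
def expand_neighbors_py (blocks : List String) (base_keep : List Bool) (block_features : List (List (String × Int))) (window : Int) : List Bool :=
  let n : Int := (blocks.length : Int)
  (PySem.List.enumerate base_keep).foldl
    (fun keep ik =>
      if ik.2 = false then keep
      else
        (PySem.List.pyRange (max 0 (ik.1 - window)) (min n (ik.1 + window + 1))).foldl
          (fun keep j =>
            if PySem.List.pyGetD keep j false = true then keep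
            else if pvQualify (PySem.List.pyGetD block_features j []) then
              PySem.List.pySetD keep j true
            else keep)
          keep)
    base_keep

-- ===== PORT B =====
def expand_neighbors_py_alt (blocks : List String) (base_keep : List Bool) (block_features : List (List (String × Int))) (window : Int) : List Bool :=
  let n : Int := (blocks.length : Int)
  let L : Int := (base_keep.length : Int)
  let pre : List Int :=
    base_keep.foldl (fun p k => p ++ [PySem.List.pyGetD p (-1) 0 + (if k then 1 else 0)]) [0]
  (PySem.List.enumerate base_keep).map
    (fun jb =>
      if jb.2 = true then true
      else
        let lo := min L (max 0 (jb.1 - window))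
        let hi := max 0 (min L (jb.1 + window + 1))
        if jb.1 < n ∧ PySem.List.pyGetD pre lo 0 < PySem.List.pyGetD pre hi 0 then
          pvQualify (PySem.List.pyGetD block_features jb.1 [])
        else false)

-- ===== PRECONDITION & SPEC =====
-- feature-dict shape Python A actually reads (short-circuit order): "legal_hits" always,
-- "has_section_like" only when legal_hits < 1, "noise_hits" only when the disjunction held
def pvFeatOK (fj : List (String × Int)) : Bool :=
  match PySem.Dict.get? ⟨fj⟩ "legal_hits" with
  | none => false
  | some v =>
    if 1 ≤ v then (PySem.Dict.get? ⟨fj⟩ "noise_hits").isSome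
    else
      match PySem.Dict.get? ⟨fj⟩ "has_section_like" with
      | none => false
      | some h => if h ≠ 0 then (PySem.Dict.get? ⟨fj⟩ "noise_hits").isSome else true

-- Pre_ excludes exactly the inputs where Python A raises: a window index j reaching past
-- base_keep/block_features (IndexError) or a consulted feature dict missing a key A reads (KeyError).
def Pre_expand_neighbors_py (blocks : List String) (base_keep : List Bool) (block_features : List (List (String × Int))) (window : Int) : Prop :=
  ∀ i < base_keep.length, ∀ j < blocks.length,
    (base_keep.getD i false = true ∧ (i : Int) - window ≤ (j : Int) ∧ (j : Int) ≤ (i : Int) + window) →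
      j < base_keep.length ∧
        (base_keep.getD j false = false →
          j < block_features.length ∧ pvFeatOK (block_features.getD j []) = true)

instance (blocks : List String) (base_keep : List Bool) (block_features : List (List (String × Int))) (window : Int) : Decidable (Pre_expand_neighbors_py blocks base_keep block_features window) := by
  unfold Pre_expand_neighbors_py; infer_instance

def pvWitness_expand_neighbors_py : List String × List Bool × (List (List (String × Int))) × Int :=
  (["a", "b"], [true, false], [[], [("legal_hits", 1), ("noise_hits", 0)]], 1)

def Spec_expand_neighbors_py (blocks : List String) (base_keep : List Bool) (block_features : List (List (String × Int))) (window : Int) (out : List Bool) : Prop := out = expand_neighbors_py_alt blocks base_keep block_features window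
instance (blocks : List String) (base_keep : List Bool) (block_features : List (List (String × Int))) (window : Int) (out : List Bool) : Decidable (Spec_expand_neighbors_py blocks base_keep block_features window out) := by unfold Spec_expand_neighbors_py; infer_instance

-- ===== CLAIM (what is proved, stated in full; the proofs are below) =====
def Claim_equal_expand_neighbors_py : Prop := ∀ (blocks : List String) (base_keep : List Bool) (block_features : List (List (String × Int))) (window : Int), Dom_expand_neighbors_py blocks base_keep block_features window → Pre_expand_neighbors_py blocks base_keep block_features window → Spec_expand_neighbors_py blocks base_keep block_features window (expand_neighbors_py blocks base_keep block_features window)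

-- ===== LEMMAS AND PROOFS =====

-- A's inner-loop body, abstracted over the qualification test Q
def pvStep (Q : Int → Bool) (keep : List Bool) (j : Int) : List Bool :=
  if PySem.List.pyGetD keep j false = true then keep
  else if Q j then PySem.List.pySetD keep j true
  else keep

lemma pvStep_getElem? (Q : Int → Bool) (keep : List Bool) (j : Int) (hj : 0 ≤ j) (t : Nat) :
    (pvStep Q keep j)[t]? = keep[t]?.map (fun b => b || (decide (j = (t : Int)) && Q j)) := by
  rcases Int.eq_ofNat_of_zero_le hj with ⟨m, rfl⟩
  simp only [pvStep, PySem.List.pyGetD_natCast, PySem.List.pySetD, PySem.List.pySet?,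
    PySem.List.pyIdx?]
  by_cases hmt : m = t
  · subst hmt
    cases h : keep[m]? with
    | none =>
      have hlen : ¬ m < keep.length := by
        intro hc; exact absurd h (by simp [List.getElem?_eq_getElem hc])
      simp [List.getD_eq_getElem?_getD, h, hlen]
    | some b =>
      have hlen : m < keep.length := by
        by_contra hc; rw [List.getElem?_eq_none_iff.2 (by omega)] at h; exact absurd h (by simp)
      cases b with
      | true => simp [List.getD_eq_getElem?_getD, h]
      | false =>
        by_cases hq : Q m
        · have hget : keep.getD m false = false := by
            simp [List.getD_eq_getElem?_getD, h]
          rw [hget]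
          simp only [Bool.false_eq_true, if_false, hq, if_true]
          rw [if_pos (by positivity : (0:Int) ≤ (m:Int)), if_pos (by exact_mod_cast hlen)]
          simp [List.getElem?_set_self hlen, h, hq]
        · simp [List.getD_eq_getElem?_getD, h, hq]
  · have hne : ((m : Int) = (t : Int)) = False := by simp [Int.ofNat_inj]; omega
    have base : keep[t]?.map (fun b => b || (decide ((m:Int) = (t : Int)) && Q m)) = keep[t]? := by
      cases keep[t]? <;> simp [hne]
    rw [base]
    split
    · rfl
    split
    · split
      · simp only [Int.toNat_natCast]
        exact List.getElem?_set_ne hmt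
      · rfl
    · rfl

lemma pvFold_getElem? (Q : Int → Bool) (js : List Int) (hjs : ∀ j ∈ js, 0 ≤ j)
    (keep : List Bool) (t : Nat) :
    (js.foldl (pvStep Q) keep)[t]? =
      keep[t]?.map (fun b => b || (decide ((t : Int) ∈ js) && Q (t : Int))) := by
  induction js generalizing keep with
  | nil => cases h : keep[t]? <;> simp [h]
  | cons j js ih =>
    rw [List.foldl_cons, ih (fun x hx => hjs x (List.mem_cons_of_mem _ hx)),
      pvStep_getElem? Q keep j (hjs j List.mem_cons_self) t]
    cases h : keep[t]? with
    | none => simp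
    | some b =>
      simp only [Option.map_some]
      by_cases hjt : j = (t : Int)
      · subst hjt
        simp only [List.mem_cons, decide_eq_true_eq]
        cases b <;> cases hq : Q (t : Int) <;> simp [hq]
      · have hmem : ((t : Int) ∈ j :: js) ↔ ((t : Int) ∈ js) := by
          rw [List.mem_cons]
          constructor
          · rintro (h | h)
            · exact absurd h.symm hjt
            · exact h
          · exact Or.inr
        simp [hjt, hmem]

-- does index t lie in the expansion window of kept index i?
def pvWin (n window : Int) (i : Int) (t : Nat) : Bool :=
  decide (max 0 (i - window) ≤ (t : Int) ∧ (t : Int) < min n (i + window + 1))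

lemma pvOuter_getElem? (n window : Int) (Q : Int → Bool) (ps : List (Int × Bool))
    (keep : List Bool) (t : Nat) :
    (ps.foldl
        (fun keep ik =>
          if ik.2 = false then keep
          else (PySem.List.pyRange (max 0 (ik.1 - window)) (min n (ik.1 + window + 1))).foldl
            (pvStep Q) keep)
        keep)[t]? =
      keep[t]?.map (fun b =>
        b || (ps.any (fun ik => ik.2 && pvWin n window ik.1 t) && Q (t : Int))) := by
  induction ps generalizing keep with
  | nil => cases h : keep[t]? <;> simp [h]
  | cons ik ps ih =>
    rw [List.foldl_cons, ih]
    by_cases hk : ik.2 = false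
    · rw [if_pos hk]
      cases h : keep[t]? <;> simp [h, hk]
    · rw [if_neg hk]
      replace hk : ik.2 = true := by revert hk; cases ik.2 <;> simp
      rw [pvFold_getElem? Q _ (fun j hj => by
        have := PySem.List.mem_pyRange_one.1 hj
        omega) keep t]
      have hmem : decide ((t : Int) ∈ PySem.List.pyRange (max 0 (ik.1 - window))
          (min n (ik.1 + window + 1))) = pvWin n window ik.1 t := by
        simp only [pvWin]
        rw [decide_eq_decide]
        exact PySem.List.mem_pyRange_one
      cases h : keep[t]? with
      | none => simp [h]
      | some b =>
        simp only [Option.map_some, List.any_cons, hk, Bool.true_and, hmem]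
        cases b <;> cases hq : Q (t : Int) <;>
          cases hw : pvWin n window ik.1 t <;> simp [hq, hw]

-- the prefix list B builds is the running count of `true` in base_keep
lemma pvPrefix_eq (bk : List Bool) :
    bk.foldl (fun p k => p ++ [PySem.List.pyGetD p (-1) 0 + (if k then 1 else 0)]) [0] =
      (List.range (bk.length + 1)).map (fun m => (((bk.take m).countP id : Nat) : Int)) := by
  induction bk using List.reverseRecOn with
  | nil => simp
  | append_singleton xs x ih =>
    rw [List.foldl_append, List.foldl_cons, List.foldl_nil, ih]
    have hsplit : (List.range (xs.length + 1)).map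
          (fun m => (((xs.take m).countP id : Nat) : Int)) =
        (List.range xs.length).map (fun m => (((xs.take m).countP id : Nat) : Int)) ++
          [((xs.countP id : Nat) : Int)] := by
      rw [List.range_succ, List.map_append, List.map_singleton, List.take_length]
    rw [hsplit, PySem.List.pyGetD_neg_one_append_singleton]
    have hlen : (xs ++ [x]).length + 1 = (xs.length + 1) + 1 := by simp
    rw [hlen, List.range_succ, List.map_append, List.map_singleton]
    congr 1
    · rw [← hsplit]
      apply List.map_congr_left
      intro m hm
      rw [List.mem_range] at hm
      rw [List.take_append_of_le_length (by omega)]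
    · rw [List.take_of_length_le (by simp), List.countP_append]
      cases x <;> simp [List.countP_cons]

lemma pvCount_lt_iff (bk : List Bool) (a b : Nat) (hb : b ≤ bk.length) :
    (bk.take a).countP id < (bk.take b).countP id ↔
      ∃ k, a ≤ k ∧ k < b ∧ bk.getD k false = true := by
  by_cases hab : b ≤ a
  · have hmono : (bk.take b).countP id ≤ (bk.take a).countP id := by
      have : bk.take b = (bk.take a).take b := by rw [List.take_take, min_eq_left hab]
      rw [this]
      exact List.Sublist.countP_le (List.take_sublist _ _)
    constructor
    · omega
    · rintro ⟨k, h1, h2, _⟩; omega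
  · replace hab : a < b := by omega
    have hsplit : bk.take b = bk.take a ++ (bk.drop a).take (b - a) := by
      have hba : b = a + (b - a) := by omega
      rw [hba, List.take_add]
      simp
    rw [hsplit, List.countP_append]
    have hmidlen : ((bk.drop a).take (b - a)).length = b - a := by
      simp [List.length_take, List.length_drop]; omega
    constructor
    · intro hlt
      have hpos : 0 < ((bk.drop a).take (b - a)).countP id := by omega
      obtain ⟨y, hy, hyt⟩ := List.countP_pos_iff.1 hpos
      obtain ⟨i, hi, hival⟩ := List.mem_iff_getElem.1 hy
      refine ⟨a + i, by omega, by omega, ?_⟩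
      have : ((bk.drop a).take (b - a))[i] = bk[a + i]'(by omega) := by
        rw [List.getElem_take, List.getElem_drop]
      rw [List.getD_eq_getElem _ _ (by omega), ← this, hival]
      simpa [id] using hyt
    · rintro ⟨k, h1, h2, hk⟩
      have hklen : k < bk.length := by omega
      have hval : ((bk.drop a).take (b - a))[k - a]'(by omega) = true := by
        rw [List.getElem_take, List.getElem_drop]
        have : a + (k - a) = k := by omega
        rw [List.getD_eq_getElem _ _ hklen] at hk
        simp_rw [this]
        exact hk
      have hmem : (true : Bool) ∈ (bk.drop a).take (b - a) := by
        rw [← hval]; exact List.getElem_mem _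
      have : 0 < ((bk.drop a).take (b - a)).countP id := List.countP_pos_iff.2 ⟨true, hmem, rfl⟩
      omega

lemma pvCond_eq (blocks : List String) (bk : List Bool)
    (w : Int) (t : Nat) (ht : t < bk.length) :
    (((t : Int) < (blocks.length : Int) ∧
        PySem.List.pyGetD
          (bk.foldl (fun p k => p ++ [PySem.List.pyGetD p (-1) 0 + (if k then 1 else 0)]) [(0 : Int)])
          (min (bk.length : Int) (max 0 ((t : Int) - w))) 0 <
        PySem.List.pyGetD
          (bk.foldl (fun p k => p ++ [PySem.List.pyGetD p (-1) 0 + (if k then 1 else 0)]) [(0 : Int)])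
          (max 0 (min (bk.length : Int) ((t : Int) + w + 1))) 0) ↔
      (PySem.List.enumerate bk).any
        (fun ik => ik.2 && pvWin (blocks.length : Int) w ik.1 t) = true) := by
  rw [pvPrefix_eq]
  set L : Int := (bk.length : Int) with hL
  set lo : Int := min L (max 0 ((t : Int) - w)) with hlo
  set hi : Int := max 0 (min L ((t : Int) + w + 1)) with hhi
  have hlo0 : 0 ≤ lo := by rw [hlo, hL]; omega
  have hhi0 : 0 ≤ hi := by rw [hhi]; omega
  have hloL : lo ≤ L := by rw [hlo]; omega
  have hhiL : hi ≤ L := by rw [hhi]; omega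
  have hlo' : lo = ((lo.toNat : Nat) : Int) := by omega
  have hhi' : hi = ((hi.toNat : Nat) : Int) := by omega
  rw [hlo', hhi', PySem.List.pyGetD_natCast, PySem.List.pyGetD_natCast,
    PySem.List.getD_map_range _ _ _ _ (by omega), PySem.List.getD_map_range _ _ _ _ (by omega)]
  rw [Nat.cast_lt, Nat.cast_lt, pvCount_lt_iff bk _ _ (by omega)]
  rw [List.any_eq_true]
  constructor
  · rintro ⟨htn, k, hk1, hk2, hkv⟩
    have hklen : k < bk.length := by omega
    refine ⟨((k : Int), bk[k]), ?_, ?_⟩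
    · rw [PySem.List.mem_enumerate_iff]
      exact ⟨k, hklen, by simp⟩
    · have : bk[k] = true := by rwa [List.getD_eq_getElem _ _ hklen] at hkv
      rw [this]
      simp only [Bool.true_and, pvWin, decide_eq_true_eq]
      omega
  · rintro ⟨ik, hmem, hik⟩
    rw [PySem.List.mem_enumerate_iff] at hmem
    obtain ⟨k, hklen, rfl⟩ := hmem
    simp only [Bool.and_eq_true, pvWin, decide_eq_true_eq] at hik
    obtain ⟨hkv, hw1, hw2⟩ := hik
    refine ⟨by omega, k, by omega, by omega, ?_⟩
    rw [List.getD_eq_getElem _ _ hklen]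
    exact hkv

lemma pvAeqB (blocks : List String) (bk : List Bool) (bf : List (List (String × Int))) (w : Int) :
    expand_neighbors_py blocks bk bf w = expand_neighbors_py_alt blocks bk bf w := by
  apply List.ext_getElem?
  intro t
  have hA : (expand_neighbors_py blocks bk bf w)[t]? =
      bk[t]?.map (fun b =>
        b || ((PySem.List.enumerate bk).any
            (fun ik => ik.2 && pvWin (blocks.length : Int) w ik.1 t) &&
          pvQualify (PySem.List.pyGetD bf (t : Int) []))) :=
    pvOuter_getElem? (blocks.length : Int) w
      (fun j => pvQualify (PySem.List.pyGetD bf j [])) (PySem.List.enumerate bk) bk t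
  rw [hA]
  show _ = (expand_neighbors_py_alt blocks bk bf w)[t]?
  unfold expand_neighbors_py_alt
  rw [List.getElem?_map, PySem.List.getElem?_enumerate]
  cases h : bk[t]? with
  | none => simp
  | some v =>
    have ht : t < bk.length := by
      by_contra hc
      rw [List.getElem?_eq_none_iff.2 (by omega)] at h
      exact absurd h (by simp)
    simp only [Option.map_some]
    congr 1
    cases v with
    | true => simp
    | false =>
      simp only [Bool.false_eq_true, if_false, Bool.false_or]
      have hzt : (0 : Int) + (t : Int) = (t : Int) := by ring
      rw [hzt]
      by_cases hc : ((t : Int) < (blocks.length : Int) ∧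
          PySem.List.pyGetD
            (bk.foldl (fun p k => p ++ [PySem.List.pyGetD p (-1) 0 + (if k then 1 else 0)]) [(0 : Int)])
            (min (bk.length : Int) (max 0 ((t : Int) - w))) 0 <
          PySem.List.pyGetD
            (bk.foldl (fun p k => p ++ [PySem.List.pyGetD p (-1) 0 + (if k then 1 else 0)]) [(0 : Int)])
            (max 0 (min (bk.length : Int) ((t : Int) + w + 1))) 0)
      · rw [if_pos hc]
        rw [(pvCond_eq blocks bk w t ht).1 hc]
        simp
      · rw [if_neg hc]
        have : ¬ ((PySem.List.enumerate bk).any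
            (fun ik => ik.2 && pvWin (blocks.length : Int) w ik.1 t) = true) := by
          intro hx
          exact hc ((pvCond_eq blocks bk w t ht).2 hx)
        simp only [Bool.not_eq_true] at this
        rw [this]
        simp

-- ===== VERDICT (by name: the statement is the Claim_ definition above) =====
theorem expand_neighbors_py_spec : Claim_equal_expand_neighbors_py := by
  intro blocks base_keep block_features window _ _
  unfold Spec_expand_neighbors_py
  exact pvAeqB blocks base_keep block_features window
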